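-- pv_equiv track=rewrite | github.com/PhantomVein/discourse_sentence | data/Explain.py | find_context
-- ===== SOURCE A (Python) =====
-- def find_context(segment, sentences):
--     for sentence in sentences:
--         if sentence.find(segment) != -1:
--             return sentence
--     for i in range(1, len(sentences) + 1):
--         j = 0
--         while i + j <= len(sentences):
--             sen = ''.join(sentences[j:i + j])
--             if sen.find(segment) != -1:
--                 return sen
--             j += 1
--     return None
-- ===== SOURCE B (Python) =====
-- def find_context(segment, sentences):
--     if not sentences:
--         return None
--     if segment == "":
--         return sentences[0]
--     owner = []
--     for k, s in enumerate(sentences):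
--         owner += [k] * len(s)
--     full = "".join(sentences)
--     m = len(segment)
--     best = None
--     for p in range(len(full) - m + 1):
--         if full[p:p + m] == segment:
--             a = owner[p]
--             b = owner[p + m - 1]
--             size = b - a + 1
--             if best is None or size < best[0] or (size == best[0] and a < best[1]):
--                 best = (size, a)
--     if best is None:
--         return None
--     return "".join(sentences[best[1]:best[1] + best[0]])
-- ===== Notes on version B (the rewrite author's own statement) =====
-- stated objective: faster
-- what changed: Instead of joining and searching every contiguous span of sentences in order of increasing span size, B concatenates the sentences once, maps each character to its owning sentence, scans the concatenation once for occurrences of the segment, and picks the occurrence whose covering sentence window is lexicographically minimal by (window size, start).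
import Mathlib
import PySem

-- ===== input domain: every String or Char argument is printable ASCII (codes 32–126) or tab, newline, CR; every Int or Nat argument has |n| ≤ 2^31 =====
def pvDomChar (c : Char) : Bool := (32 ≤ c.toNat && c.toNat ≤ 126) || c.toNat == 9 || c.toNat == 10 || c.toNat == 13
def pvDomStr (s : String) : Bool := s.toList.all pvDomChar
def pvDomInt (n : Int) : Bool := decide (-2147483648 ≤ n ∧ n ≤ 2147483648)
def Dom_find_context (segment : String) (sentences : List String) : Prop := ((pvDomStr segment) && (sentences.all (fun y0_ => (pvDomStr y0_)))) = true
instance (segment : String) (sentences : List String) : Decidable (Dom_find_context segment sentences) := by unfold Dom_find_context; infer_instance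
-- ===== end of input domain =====

-- B replaces A's search over all O(n^2) joined spans by one concatenation with a char→sentence
-- owner map and a single scan for segment occurrences, picking the (span size, start)-minimal window.

-- ===== PORT A =====
-- first loop: 'for sentence in sentences: if sentence.find(segment) != -1: return sentence'
def pvFindFirst (segment : String) : List String → Option String
  | [] => none
  | s :: rest => if PySem.Str.find s segment ≠ -1 then some s else pvFindFirst segment rest

-- inner 'while i + j <= len(sentences)' loop (j starts at 0 and only increases by 1, kept as Nat)
def pvWhileA (segment : String) (sentences : List String) (i : Int) (j : Nat) : Option String :=
  if _h : i + (j : Int) ≤ (sentences.length : Int) then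
    let sen := PySem.Str.join "" (PySem.List.slice sentences (some (j : Int)) (some (i + (j : Int))))
    if PySem.Str.find sen segment ≠ -1 then some sen
    else pvWhileA segment sentences i (j + 1)
  else none
termination_by ((sentences.length : Int) + 1 - i - (j : Int)).toNat
decreasing_by omega

-- outer 'for i in range(1, len(sentences) + 1)' loop with early return
def pvOuterA (segment : String) (sentences : List String) : List Int → Option String
  | [] => none
  | i :: rest =>
    match pvWhileA segment sentences i 0 with
    | some s => some s
    | none => pvOuterA segment sentences rest

def find_context (segment : String) (sentences : List String) : Option String :=
  match pvFindFirst segment sentences with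
  | some s => some s
  | none => pvOuterA segment sentences (PySem.List.pyRange 1 ((sentences.length : Int) + 1) 1)

-- ===== PORT B =====
-- 'owner = []; for k, s in enumerate(sentences): owner += [k] * len(s)'
def pvOwner (sentences : List String) : List Int :=
  (PySem.List.enumerate sentences 0).foldl
    (fun acc ks => acc ++ List.replicate ks.2.toList.length ks.1) []

-- one iteration of B's scan over the candidate occurrence positions p
def pvStep (segment full : String) (owner : List Int) (m : Int)
    (best : Option (Int × Int)) (p : Int) : Option (Int × Int) :=
  if PySem.Str.slice full (some p) (some (p + m)) == segment then
    let a := (PySem.List.pyGet? owner p).getD 0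
    let b := (PySem.List.pyGet? owner (p + m - 1)).getD 0
    let size := b - a + 1
    match best with
    | none => some (size, a)
    | some bst => if size < bst.1 ∨ (size = bst.1 ∧ a < bst.2) then some (size, a) else best
  else best

def find_context_alt (segment : String) (sentences : List String) : Option String :=
  match sentences with
  | [] => none
  | s0 :: _ =>
    if segment = "" then some s0
    else
      let owner := pvOwner sentences
      let full := PySem.Str.join "" sentences
      let m : Int := PySem.Str.len segment
      let best := (PySem.List.pyRange 0 (PySem.Str.len full - m + 1) 1).foldl
        (pvStep segment full owner m) none
      match best with
      | none => none
      | some bst =>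
        some (PySem.Str.join "" (PySem.List.slice sentences (some bst.2) (some (bst.2 + bst.1))))

-- ===== PRECONDITION & SPEC =====
def Spec_find_context (segment : String) (sentences : List String) (out : Option String) : Prop := out = find_context_alt segment sentences
instance (segment : String) (sentences : List String) (out : Option String) : Decidable (Spec_find_context segment sentences out) := by unfold Spec_find_context; infer_instance

-- ===== CLAIM (what is proved, stated in full; the proofs are below) =====
def Claim_equal_find_context : Prop := ∀ (segment : String) (sentences : List String), Dom_find_context segment sentences → Spec_find_context segment sentences (find_context segment sentences)

-- ===== LEMMAS AND PROOFS =====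

-- proof-side abbreviations
def pvCss (sentences : List String) : List (List Char) := sentences.map String.toList
def pvOffs (css : List (List Char)) (k : Nat) : Nat := ((css.take k).flatten).length
def pvOwnerNat : List (List Char) → Nat → Nat
  | [], _ => 0
  | s :: rest, q => if q < s.length then 0 else pvOwnerNat rest (q - s.length) + 1
def pvOwnerSpec (c : Int) : List (List Char) → List Int
  | [] => []
  | s :: rest => List.replicate s.length c ++ pvOwnerSpec (c + 1) rest
def pvOcc (seg full : List Char) (p : Nat) : Prop := seg <+: full.drop p
def pvP (seg : List Char) (css : List (List Char)) (i j : Nat) : Prop :=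
  seg <:+: ((css.drop j).take i).flatten
def pvLexUpd (best : Option (Int × Int)) (c : Int × Int) : Option (Int × Int) :=
  match best with
  | none => some c
  | some b => if c.1 < b.1 ∨ (c.1 = b.1 ∧ c.2 < b.2) then some c else some b
def pvLexLE (x y : Int × Int) : Prop := x.1 < y.1 ∨ (x.1 = y.1 ∧ x.2 ≤ y.2)
def pvCand (css : List (List Char)) (m k : Nat) : Int × Int :=
  ((pvOwnerNat css (k + m - 1) : Int) - (pvOwnerNat css k : Int) + 1, (pvOwnerNat css k : Int))

-- join with empty separator is flatten
theorem pv_join_empty (ps : List (List Char)) : PySem.Chars.join [] ps = ps.flatten := by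
  induction ps with
  | nil => simp [PySem.Chars.join_nil]
  | cons p rest ih =>
    cases rest with
    | nil => simp [PySem.Chars.join_singleton]
    | cons q rs =>
      rw [PySem.Chars.join_cons_cons, ih]
      simp

theorem pv_joinSlice_toList (sentences : List String) (j i : Nat) :
    (PySem.Str.join "" (PySem.List.slice sentences (some (j : Int)) (some ((j : Int) + (i : Int))))).toList
      = (((pvCss sentences).drop j).take i).flatten := by
  rw [PySem.Str.toList_join, PySem.List.slice_natCast_add]
  have hsep : ("" : String).toList = [] := rfl
  rw [hsep, pv_join_empty]
  simp [pvCss, List.map_take, List.map_drop]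

-- offs basics
theorem pvOffs_zero (css : List (List Char)) : pvOffs css 0 = 0 := by simp [pvOffs]
theorem pvOffs_cons_succ (s : List Char) (rest : List (List Char)) (j : Nat) :
    pvOffs (s :: rest) (j + 1) = s.length + pvOffs rest j := by
  simp [pvOffs]
theorem pvOffs_add (css : List (List Char)) (j i : Nat) :
    pvOffs css (j + i) = pvOffs css j + pvOffs (css.drop j) i := by
  induction j generalizing css with
  | zero => simp [pvOffs_zero]
  | succ j ih =>
    cases css with
    | nil => simp [pvOffs]
    | cons s rest =>
      have h1 : j + 1 + i = (j + i) + 1 := by omega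
      rw [h1, pvOffs_cons_succ, pvOffs_cons_succ, ih]
      simp [Nat.add_assoc]
theorem pvOffs_mono (css : List (List Char)) {j j' : Nat} (h : j ≤ j') :
    pvOffs css j ≤ pvOffs css j' := by
  have h2 : j' = j + (j' - j) := by omega
  rw [h2, pvOffs_add]
  omega
theorem pvOffs_top (css : List (List Char)) : pvOffs css css.length = css.flatten.length := by
  simp [pvOffs]
theorem pvOffs_le_len (css : List (List Char)) (j : Nat) : pvOffs css j ≤ css.flatten.length := by
  by_cases h : j ≤ css.length
  · have := pvOffs_mono css h
    rw [pvOffs_top] at this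
    exact this
  · unfold pvOffs
    rw [List.take_of_length_le (by omega)]

theorem pv_flatten_take (css : List (List Char)) (i : Nat) :
    (css.take i).flatten = css.flatten.take (pvOffs css i) := by
  induction css generalizing i with
  | nil => simp [pvOffs]
  | cons s rest ih =>
    cases i with
    | zero => simp [pvOffs_zero]
    | succ i =>
      have h1 : List.take (s.length + pvOffs rest i) s = s := List.take_of_length_le (by omega)
      have h2 : s.length + pvOffs rest i - s.length = pvOffs rest i := by omega
      rw [List.take_succ_cons, List.flatten_cons, ih, pvOffs_cons_succ, List.flatten_cons,
        List.take_append, h1, h2]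
theorem pv_flatten_drop (css : List (List Char)) (j : Nat) :
    (css.drop j).flatten = css.flatten.drop (pvOffs css j) := by
  induction css generalizing j with
  | nil => simp [pvOffs]
  | cons s rest ih =>
    cases j with
    | zero => simp [pvOffs_zero]
    | succ j =>
      have h1 : List.drop (s.length + pvOffs rest j) s = [] := List.drop_eq_nil_of_le (by omega)
      have h2 : s.length + pvOffs rest j - s.length = pvOffs rest j := by omega
      rw [List.drop_succ_cons, ih, pvOffs_cons_succ, List.flatten_cons,
        List.drop_append, h1, h2]
      simp
theorem pv_flatten_drop_take (css : List (List Char)) (j i : Nat) :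
    ((css.drop j).take i).flatten
      = (css.flatten.drop (pvOffs css j)).take (pvOffs css (j + i) - pvOffs css j) := by
  rw [pv_flatten_take (css.drop j) i, pv_flatten_drop css j]
  have := pvOffs_add css j i
  have h2 : pvOffs (css.drop j) i = pvOffs css (j + i) - pvOffs css j := by omega
  rw [h2]

-- owner array lemmas
theorem pvOwner_eq (sentences : List String) :
    pvOwner sentences = pvOwnerSpec 0 (pvCss sentences) := by
  suffices h : ∀ (l : List String) (c : Int) (acc : List Int),
      (PySem.List.enumerate l c).foldl (fun acc ks => acc ++ List.replicate ks.2.toList.length ks.1) acc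
        = acc ++ pvOwnerSpec c (l.map String.toList) by
    simpa [pvOwner, pvCss] using h sentences 0 []
  intro l
  induction l with
  | nil => intro c acc; simp [pvOwnerSpec, PySem.List.enumerate]
  | cons s rest ih =>
    intro c acc
    rw [PySem.List.enumerate_cons]
    simp only [List.foldl_cons]
    rw [ih]
    simp [pvOwnerSpec]
theorem pvOwnerSpec_getElem? (css : List (List Char)) (c : Int) (q : Nat)
    (hq : q < css.flatten.length) :
    (pvOwnerSpec c css)[q]? = some (c + (pvOwnerNat css q : Int)) := by
  induction css generalizing c q with
  | nil => simp at hq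
  | cons s rest ih =>
    simp only [List.flatten_cons, List.length_append] at hq
    simp only [pvOwnerSpec]
    by_cases h : q < s.length
    · rw [List.getElem?_append_left (by simpa using h)]
      simp [h, pvOwnerNat]
    · rw [List.getElem?_append_right (by simpa using h)]
      simp only [List.length_replicate]
      rw [ih (c + 1) (q - s.length) (by omega)]
      simp only [pvOwnerNat, if_neg h]
      congr 1
      push_cast
      ring
theorem pvOwnerNat_lt_iff (css : List (List Char)) (q j : Nat) (hq : q < css.flatten.length) :
    pvOwnerNat css q < j ↔ q < pvOffs css j := by
  induction css generalizing q j with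
  | nil => simp at hq
  | cons s rest ih =>
    simp only [List.flatten_cons, List.length_append] at hq
    by_cases h : q < s.length
    · simp only [pvOwnerNat, if_pos h]
      cases j with
      | zero => simp [pvOffs_zero]
      | succ j =>
        rw [pvOffs_cons_succ]
        constructor <;> intro <;> omega
    · simp only [pvOwnerNat, if_neg h]
      cases j with
      | zero => simp [pvOffs_zero]
      | succ j =>
        rw [pvOffs_cons_succ]
        have := ih (q - s.length) j (by omega)
        omega
theorem pvOwnerNat_lt_length (css : List (List Char)) (q : Nat) (hq : q < css.flatten.length) :
    pvOwnerNat css q < css.length := by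
  rw [pvOwnerNat_lt_iff css q _ hq, pvOffs_top]; exact hq
theorem pvOwnerNat_mono (css : List (List Char)) {q q' : Nat} (h : q ≤ q')
    (hq' : q' < css.flatten.length) : pvOwnerNat css q ≤ pvOwnerNat css q' := by
  by_contra hlt
  rw [not_le] at hlt
  have h1 := (pvOwnerNat_lt_iff css q' (pvOwnerNat css q) hq').mp hlt
  have h2 := (pvOwnerNat_lt_iff css q (pvOwnerNat css q) (lt_of_le_of_lt h hq')).not.mp (by omega)
  omega
-- occurrences
theorem pvOcc_bound {seg full : List Char} {p : Nat} (hm : 1 ≤ seg.length)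
    (h : pvOcc seg full p) : p + seg.length ≤ full.length := by
  have := h.length_le
  rw [List.length_drop] at this
  omega
theorem pv_infix_drop_take_iff (x seg : List Char) (o t : Nat) (hm : 1 ≤ seg.length)
    (_ht : o + t ≤ x.length) :
    (seg <:+: (x.drop o).take t) ↔ ∃ p, o ≤ p ∧ p + seg.length ≤ o + t ∧ seg <+: x.drop p := by
  have hiff : ∀ (y : List Char), (seg <:+: y) ↔ ∃ d, seg <+: y.drop d := by
    intro y
    rw [← PySem.Chars.isIn_iff_infix, ← PySem.Chars.exists_prefix_drop_iff_isIn]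
  constructor
  · intro h
    obtain ⟨d, hd⟩ := (hiff _).mp h
    rw [List.drop_take, List.drop_drop] at hd
    rw [List.prefix_take_iff] at hd
    obtain ⟨hpre, hlen⟩ := hd
    exact ⟨o + d, by omega, by omega, hpre⟩
  · rintro ⟨p, hop, hpm, hpre⟩
    apply (hiff _).mpr
    refine ⟨p - o, ?_⟩
    rw [List.drop_take, List.drop_drop, show o + (p - o) = p by omega, List.prefix_take_iff]
    exact ⟨hpre, by omega⟩
theorem pvP_iff (seg : List Char) (css : List (List Char)) (i j : Nat) (hm : 1 ≤ seg.length) :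
    pvP seg css i j ↔ ∃ p, pvOcc seg css.flatten p ∧ pvOffs css j ≤ p ∧ p + seg.length ≤ pvOffs css (j + i) := by
  unfold pvP
  have h1 := pvOffs_mono css (Nat.le_add_right j i)
  have h2 := pvOffs_le_len css (j + i)
  rw [pv_flatten_drop_take, pv_infix_drop_take_iff _ _ _ _ hm (by omega)]
  constructor
  · rintro ⟨p, hop, hpm, hpre⟩
    exact ⟨p, hpre, hop, by omega⟩
  · rintro ⟨p, hocc, hop, hpm⟩
    exact ⟨p, hop, by omega, hocc⟩
theorem pv_window_fit_iff (seg : List Char) (css : List (List Char)) (p i j : Nat)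
    (hm : 1 ≤ seg.length) (hb : p + seg.length ≤ css.flatten.length) :
    (pvOffs css j ≤ p ∧ p + seg.length ≤ pvOffs css (j + i))
      ↔ (j ≤ pvOwnerNat css p ∧ pvOwnerNat css (p + seg.length - 1) < j + i) := by
  have hpL : p < css.flatten.length := by omega
  have hqL : p + seg.length - 1 < css.flatten.length := by omega
  constructor
  · rintro ⟨h1, h2⟩
    constructor
    · have := (pvOwnerNat_lt_iff css p j hpL).not.mpr (by omega)
      omega
    · exact (pvOwnerNat_lt_iff css (p + seg.length - 1) (j + i) hqL).mpr (by omega)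
  · rintro ⟨h1, h2⟩
    constructor
    · have := (pvOwnerNat_lt_iff css p j hpL).not.mp (by omega)
      omega
    · have := (pvOwnerNat_lt_iff css (p + seg.length - 1) (j + i) hqL).mp h2
      omega

-- A-side loop lemmas
def pvQ (segment : String) (sentences : List String) (i : Int) (j : Nat) : Prop :=
  PySem.Str.find (PySem.Str.join "" (PySem.List.slice sentences (some (j : Int)) (some (i + (j : Int))))) segment ≠ -1
theorem pvQ_iff (segment : String) (sentences : List String) (i j : Nat) :
    pvQ segment sentences (i : Int) j ↔ pvP segment.toList (pvCss sentences) i j := by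
  unfold pvQ pvP
  rw [show ((i : Nat) : Int) + ((j : Nat) : Int) = ((j : Nat) : Int) + ((i : Nat) : Int) from by ring]
  rw [PySem.Str.find_ne_neg_one_iff, pv_joinSlice_toList]
theorem pvWhileA_none (segment : String) (sentences : List String) (i : Int) (j : Nat)
    (h : ∀ j', j ≤ j' → i + (j' : Int) ≤ (sentences.length : Int) → ¬ pvQ segment sentences i j') :
    pvWhileA segment sentences i j = none := by
  rw [pvWhileA.eq_def]
  split
  · next hg =>
    have hq : ¬ pvQ segment sentences i j := h j le_rfl hg
    unfold pvQ at hq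
    simp only [if_neg hq]
    exact pvWhileA_none segment sentences i (j + 1) (fun j' h1 h2 => h j' (by omega) h2)
  · rfl
termination_by ((sentences.length : Int) + 1 - i - (j : Int)).toNat
decreasing_by omega
theorem pvWhileA_found (segment : String) (sentences : List String) (i : Int) (j j₀ : Nat)
    (hj : j ≤ j₀) (hb : i + (j₀ : Int) ≤ (sentences.length : Int))
    (hmin : ∀ j', j ≤ j' → j' < j₀ → ¬ pvQ segment sentences i j')
    (hq : pvQ segment sentences i j₀) :
    pvWhileA segment sentences i j
      = some (PySem.Str.join "" (PySem.List.slice sentences (some (j₀ : Int)) (some (i + (j₀ : Int))))) := by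
  have hg : i + (j : Int) ≤ (sentences.length : Int) := by
    have : (j : Int) ≤ (j₀ : Int) := by exact_mod_cast hj
    omega
  rw [pvWhileA.eq_def, dif_pos hg]
  by_cases he : j = j₀
  · subst he
    unfold pvQ at hq
    simp only [if_pos hq]
  · have hq' : ¬ pvQ segment sentences i j := hmin j le_rfl (by omega)
    unfold pvQ at hq'
    simp only [if_neg hq']
    exact pvWhileA_found segment sentences i (j + 1) j₀ (by omega) hb
      (fun j' h1 h2 => hmin j' (by omega) h2) hq
termination_by j₀ - j
decreasing_by omega
theorem pvOuterA_none (segment : String) (sentences : List String) (l : List Int)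
    (h : ∀ i ∈ l, pvWhileA segment sentences i 0 = none) :
    pvOuterA segment sentences l = none := by
  induction l with
  | nil => rfl
  | cons i rest ih =>
    unfold pvOuterA
    rw [h i (by simp)]
    exact ih (fun i' hi' => h i' (by simp [hi']))
theorem pvOuterA_append (segment : String) (sentences : List String) (l1 l2 : List Int)
    (h : ∀ i ∈ l1, pvWhileA segment sentences i 0 = none) :
    pvOuterA segment sentences (l1 ++ l2) = pvOuterA segment sentences l2 := by
  induction l1 with
  | nil => rfl
  | cons i rest ih =>
    have hred : pvOuterA segment sentences (i :: (rest ++ l2)) =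
        match pvWhileA segment sentences i 0 with
        | some s => some s
        | none => pvOuterA segment sentences (rest ++ l2) := rfl
    rw [List.cons_append, hred, h i (by simp)]
    exact ih (fun i' hi' => h i' (by simp [hi']))
theorem pvFindFirst_none (segment : String) (sentences : List String)
    (h : ∀ s ∈ sentences, ¬ (PySem.Str.find s segment ≠ -1)) :
    pvFindFirst segment sentences = none := by
  induction sentences with
  | nil => rfl
  | cons s rest ih =>
    unfold pvFindFirst
    rw [if_neg (h s (by simp))]
    exact ih (fun s' hs' => h s' (by simp [hs']))
theorem pvFindFirst_found (segment : String) (sentences : List String) (j : Nat)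
    (hj : j < sentences.length)
    (hmin : ∀ j' (hj' : j' < sentences.length), j' < j → ¬ (PySem.Str.find sentences[j'] segment ≠ -1))
    (hq : PySem.Str.find (sentences[j]'hj) segment ≠ -1) :
    pvFindFirst segment sentences = some (sentences[j]'hj) := by
  induction sentences generalizing j with
  | nil => simp at hj
  | cons s rest ih =>
    cases j with
    | zero =>
      unfold pvFindFirst
      simp only [List.getElem_cons_zero] at hq ⊢
      rw [if_pos hq]
    | succ j =>
      have h0 : ¬ (PySem.Str.find s segment ≠ -1) := by
        have := hmin 0 (by simp) (by omega)
        simpa using this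
      unfold pvFindFirst
      rw [if_neg h0]
      have hj' : j < rest.length := by simpa using hj
      have := ih j hj' (fun j' hlt hlt2 => by
        have := hmin (j' + 1) (by simpa using hlt) (by omega)
        simpa using this) (by simpa using hq)
      simpa using this

-- B-side fold lemmas
theorem pvStep_eq (segment full : String) (owner : List Int) (m : Int)
    (best : Option (Int × Int)) (p : Int) :
    pvStep segment full owner m best p
      = if PySem.Str.slice full (some p) (some (p + m)) == segment then
          pvLexUpd best (((PySem.List.pyGet? owner (p + m - 1)).getD 0) - ((PySem.List.pyGet? owner p).getD 0) + 1,
            (PySem.List.pyGet? owner p).getD 0)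
        else best := by
  cases best <;> simp [pvStep, pvLexUpd]
theorem pvLexUpd_min (l : List (Int × Int)) : ∀ b0 : Int × Int,
    ∃ b, l.foldl pvLexUpd (some b0) = some b ∧ (b = b0 ∨ b ∈ l) ∧ pvLexLE b b0 ∧ ∀ c ∈ l, pvLexLE b c := by
  have htrans : ∀ x y z : Int × Int, pvLexLE x y → pvLexLE y z → pvLexLE x z := by
    intro x y z h1 h2
    unfold pvLexLE at *
    omega
  induction l with
  | nil =>
    intro b0
    exact ⟨b0, rfl, Or.inl rfl, Or.inr ⟨rfl, le_refl _⟩, by simp⟩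
  | cons c l ih =>
    intro b0
    set b1 := if c.1 < b0.1 ∨ (c.1 = b0.1 ∧ c.2 < b0.2) then c else b0 with hb1
    have hred : pvLexUpd (some b0) c = some b1 := by
      rw [hb1]
      simp only [pvLexUpd]
      split_ifs <;> rfl
    simp only [List.foldl_cons, hred]
    obtain ⟨b, hfold, hmem, hle, hall⟩ := ih b1
    have hb1le : pvLexLE b1 b0 ∧ pvLexLE b1 c := by
      rw [hb1]
      split_ifs with hc
      · constructor <;> (unfold pvLexLE; omega)
      · constructor <;> (unfold pvLexLE; omega)
    refine ⟨b, hfold, ?_, htrans _ _ _ hle hb1le.1, ?_⟩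
    · rcases hmem with hb | hb
      · rw [hb, hb1]
        split_ifs with hc
        · exact Or.inr (by simp)
        · exact Or.inl rfl
      · exact Or.inr (by simp [hb])
    · intro c' hc'
      rcases List.mem_cons.mp hc' with hc' | hc'
      · rw [hc']
        exact htrans _ _ _ hle hb1le.2
      · exact hall c' hc' 
theorem pv_foldl_congr {α β : Type} (l : List α) (f g : β → α → β) (a : β)
    (h : ∀ b x, x ∈ l → f b x = g b x) : l.foldl f a = l.foldl g a := by
  induction l generalizing a with
  | nil => rfl
  | cons x xs ih =>
    simp only [List.foldl_cons]
    rw [h a x (by simp)]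
    exact ih _ (fun b y hy => h b y (by simp [hy]))

theorem pvLexUpd_foldl_cons (c : Int × Int) (l : List (Int × Int)) :
    ∃ b, (c :: l).foldl pvLexUpd none = some b ∧ b ∈ c :: l ∧ ∀ c' ∈ c :: l, pvLexLE b c' := by
  simp only [List.foldl_cons]
  have h0 : pvLexUpd none c = some c := rfl
  rw [h0]
  obtain ⟨b, h1, h2, h3, h4⟩ := pvLexUpd_min l c
  refine ⟨b, h1, ?_, ?_⟩
  · rcases h2 with h | h
    · simp [h]
    · simp [h]
  · intro c' hc'
    rcases List.mem_cons.mp hc' with h | h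
    · rw [h]; exact h3
    · exact h4 c' h

theorem pv_take1_flatten (sentences : List String) (j : Nat) (hj : j < sentences.length) :
    (((pvCss sentences).drop j).take 1).flatten = (sentences[j]'hj).toList := by
  have hj' : j < (pvCss sentences).length := by simpa [pvCss] using hj
  rw [List.drop_eq_getElem_cons hj']
  simp [pvCss]

theorem pv_first_fail (segment : String) (sentences : List String)
    (h : ∀ j (_hj : j < sentences.length), ¬ pvP segment.toList (pvCss sentences) 1 j) :
    pvFindFirst segment sentences = none := by
  apply pvFindFirst_none
  intro s hs
  obtain ⟨j, hj, rfl⟩ := List.mem_iff_getElem.mp hs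
  intro hfind
  apply h j hj
  unfold pvP
  rw [pv_take1_flatten sentences j hj]
  exact (PySem.Str.find_ne_neg_one_iff _ _).mp hfind

theorem pv_first_found (segment : String) (sentences : List String) (j : Nat)
    (hj : j < sentences.length)
    (hmin : ∀ j' (_hj' : j' < sentences.length), j' < j → ¬ pvP segment.toList (pvCss sentences) 1 j')
    (hP : pvP segment.toList (pvCss sentences) 1 j) :
    pvFindFirst segment sentences = some (sentences[j]'hj) := by
  apply pvFindFirst_found segment sentences j hj
  · intro j' hj' hlt hfind
    apply hmin j' hj' hlt
    unfold pvP
    rw [pv_take1_flatten sentences j' hj']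
    exact (PySem.Str.find_ne_neg_one_iff _ _).mp hfind
  · unfold pvP at hP
    rw [pv_take1_flatten sentences j hj] at hP
    exact (PySem.Str.find_ne_neg_one_iff _ _).mpr hP

-- main case: nonempty sentences, nonempty segment
theorem pv_main (segment : String) (sentences : List String)
    (hne : sentences ≠ []) (hseg : segment ≠ "") :
    find_context segment sentences = find_context_alt segment sentences := by
  have hsegL : segment.toList ≠ [] := by
    intro h
    exact hseg (String.toList_inj.mp (by simp [h]))
  set seg : List Char := segment.toList with hsegdef
  set css : List (List Char) := pvCss sentences with hcssdef
  set mN : Nat := seg.length with hmN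
  set L : Nat := css.flatten.length with hL
  set n : Nat := sentences.length with hn
  have hm : 1 ≤ mN := by
    cases h : seg with
    | nil => exact absurd h hsegL
    | cons _ _ => simp [hmN, h]
  have hcl : css.length = n := by simp [hcssdef, pvCss, hn]
  have halt : find_context_alt segment sentences =
      (match (PySem.List.pyRange 0 (PySem.Str.len (PySem.Str.join "" sentences) - PySem.Str.len segment + 1) 1).foldl
          (pvStep segment (PySem.Str.join "" sentences) (pvOwner sentences) (PySem.Str.len segment)) none with
        | none => none
        | some bst => some (PySem.Str.join "" (PySem.List.slice sentences (some bst.2) (some (bst.2 + bst.1))))) := by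
    cases sentences with
    | nil => exact absurd rfl hne
    | cons s0 rest => simp [find_context_alt, hseg]
  have hfullL : (PySem.Str.join "" sentences).toList = css.flatten := by
    rw [PySem.Str.toList_join, show ("" : String).toList = [] from rfl, pv_join_empty]
    rfl
  have hlenfull : PySem.Str.len (PySem.Str.join "" sentences) = (L : Int) := by
    rw [PySem.Str.len_eq, hfullL]
  have hlenseg : PySem.Str.len segment = (mN : Int) := by
    rw [PySem.Str.len_eq]
  set K : Nat := L + 1 - mN with hK
  have hget : ∀ q : Nat, q < L → (PySem.List.pyGet? (pvOwner sentences) ((q : Nat) : Int)).getD 0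
      = (pvOwnerNat css q : Int) := by
    intro q hq
    rw [pvOwner_eq, PySem.List.pyGet?_natCast, ← hcssdef, pvOwnerSpec_getElem? css 0 q hq]
    simp
  set occs : List Nat := (List.range K).filter (fun k => decide (seg <+: css.flatten.drop k)) with hoccs
  have hcond : ∀ k : Nat, k < K →
      (((PySem.Str.slice (PySem.Str.join "" sentences) (some ((k : Nat) : Int)) (some (((k : Nat) : Int) + PySem.Str.len segment)) == segment) = true)
        ↔ pvOcc seg css.flatten k) := by
    intro k hk
    rw [hlenseg, beq_iff_eq, ← String.toList_inj, PySem.Str.toList_slice,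
      PySem.Chars.slice_eq_listSlice, hfullL, PySem.List.slice_natCast_add]
    unfold pvOcc
    rw [List.prefix_iff_eq_take]
    constructor
    · intro h; exact h.symm
    · intro h; exact h.symm
  have hstep : ∀ (acc : Option (Int × Int)) (k : Nat), k < K →
      pvStep segment (PySem.Str.join "" sentences) (pvOwner sentences) (PySem.Str.len segment) acc ((k : Nat) : Int)
        = if decide (seg <+: css.flatten.drop k) then pvLexUpd acc (pvCand css mN k) else acc := by
    intro acc k hk
    rw [pvStep_eq]
    by_cases hocc : pvOcc seg css.flatten k
    · have hb := pvOcc_bound (seg := seg) (full := css.flatten) (p := k) hm hocc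
      rw [if_pos ((hcond k hk).mpr hocc), if_pos (by simpa [pvOcc] using hocc)]
      rw [hget k (by omega)]
      rw [show ((k : Nat) : Int) + PySem.Str.len segment - 1 = (((k + mN - 1 : Nat)) : Int) by
        rw [hlenseg]; omega]
      rw [hget (k + mN - 1) (by omega)]
      rfl
    · rw [if_neg (fun h => hocc ((hcond k hk).mp h)), if_neg (by simpa [pvOcc] using hocc)]
  have hfold : (PySem.List.pyRange 0 (PySem.Str.len (PySem.Str.join "" sentences) - PySem.Str.len segment + 1) 1).foldl
        (pvStep segment (PySem.Str.join "" sentences) (pvOwner sentences) (PySem.Str.len segment)) none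
      = (occs.map (pvCand css mN)).foldl pvLexUpd none := by
    rw [hlenfull, hlenseg, PySem.List.pyRange_one]
    rw [show (((L : Int) - (mN : Int) + 1) - 0).toNat = K by omega]
    rw [List.foldl_map]
    rw [pv_foldl_congr _ _ (fun acc k => if decide (seg <+: css.flatten.drop k) then pvLexUpd acc (pvCand css mN k) else acc) _
      (fun acc k hk => by simpa using hstep acc k (List.mem_range.mp hk))]
    rw [hoccs, List.foldl_map, List.foldl_filter]
  have hocc_mem : ∀ p : Nat, pvOcc seg css.flatten p → p ∈ occs := by
    intro p hp
    have hb := pvOcc_bound hm hp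
    rw [hoccs]
    refine List.mem_filter.mpr ⟨List.mem_range.mpr (by omega), by simpa [pvOcc] using hp⟩
  have hmem_occ : ∀ p : Nat, p ∈ occs → pvOcc seg css.flatten p := by
    intro p hp
    rw [hoccs] at hp
    simpa [pvOcc] using (List.mem_filter.mp hp).2
  cases hosplit : occs with
  | nil =>
    have hnoP : ∀ i j : Nat, ¬ pvP seg css i j := by
      intro i j hP
      obtain ⟨p, hp, _, _⟩ := (pvP_iff seg css i j hm).mp hP
      have := hocc_mem p hp
      rw [hosplit] at this
      simp at this
    have hfirst : pvFindFirst segment sentences = none :=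
      pv_first_fail segment sentences (fun j _hj => hnoP 1 j)
    have houter : pvOuterA segment sentences (PySem.List.pyRange 1 ((sentences.length : Int) + 1) 1) = none := by
      apply pvOuterA_none
      intro i hi
      have hi' := (PySem.List.mem_pyRange_one).mp hi
      apply pvWhileA_none
      intro j' _ hguard hQ
      have hiN : i = ((i.toNat : Nat) : Int) := by omega
      rw [hiN] at hQ
      exact hnoP i.toNat j' ((pvQ_iff segment sentences i.toNat j').mp hQ)
    rw [halt, hfold, hosplit]
    simp only [List.map_nil, List.foldl_nil]
    unfold find_context
    rw [hfirst, houter]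
  | cons k0 occt =>
    obtain ⟨b, hfoldb, hbmem, hball⟩ := pvLexUpd_foldl_cons (pvCand css mN k0) (occt.map (pvCand css mN))
    have hfoldb' : (occs.map (pvCand css mN)).foldl pvLexUpd none = some b := by
      rw [hosplit]; simpa using hfoldb
    have hbmem' : b ∈ occs.map (pvCand css mN) := by
      rw [hosplit]; simpa using hbmem
    have hball' : ∀ c ∈ occs.map (pvCand css mN), pvLexLE b c := by
      rw [hosplit]
      intro c hc
      exact hball c (by simpa using hc)
    obtain ⟨pstar, hpmem, hbdef⟩ := List.mem_map.mp hbmem'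
    have hpocc := hmem_occ pstar hpmem
    have hpb := pvOcc_bound hm hpocc
    set aN : Nat := pvOwnerNat css pstar with haN
    set bN : Nat := pvOwnerNat css (pstar + mN - 1) with hbN
    have hcc : pvOwnerNat css (pstar + seg.length - 1) = pvOwnerNat css (pstar + mN - 1) := rfl
    have hab : aN ≤ bN := by
      rw [haN, hbN]
      exact pvOwnerNat_mono css (by omega) (by omega)
    have hbn : bN < n := by
      have := pvOwnerNat_lt_length css (pstar + mN - 1) (by omega)
      omega
    set wN : Nat := bN - aN + 1 with hwN
    have hwpos : 1 ≤ wN := by omega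
    have hwan : wN + aN ≤ n := by omega
    have hb12 : b = ((bN : Int) - (aN : Int) + 1, (aN : Int)) := by
      rw [← hbdef]
      unfold pvCand
      rw [← haN, ← hbN]
    have hb1 : b.1 = (wN : Int) := by
      rw [hb12]
      show (bN : Int) - (aN : Int) + 1 = (wN : Int)
      omega
    have hb2 : b.2 = (aN : Int) := by
      rw [hb12]
    have hPwa : pvP seg css wN aN := by
      apply (pvP_iff seg css wN aN hm).mpr
      refine ⟨pstar, hpocc, ?_⟩
      exact (pv_window_fit_iff seg css pstar wN aN hm (by omega)).mpr ⟨by omega, by omega⟩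
    have hminP : ∀ iN jN : Nat, 1 ≤ iN → iN + jN ≤ n → (iN < wN ∨ (iN = wN ∧ jN < aN)) →
        ¬ pvP seg css iN jN := by
      intro iN jN h1 h2 hlex hP
      obtain ⟨p, hoccp, hfit1, hfit2⟩ := (pvP_iff seg css iN jN hm).mp hP
      have hfit := (pv_window_fit_iff seg css p iN jN hm
        (le_trans hfit2 (pvOffs_le_len css _))).mp ⟨hfit1, hfit2⟩
      have hpb2 := pvOcc_bound hm hoccp
      have hccp : pvOwnerNat css (p + seg.length - 1) = pvOwnerNat css (p + mN - 1) := rfl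
      have habp : pvOwnerNat css p ≤ pvOwnerNat css (p + mN - 1) :=
        pvOwnerNat_mono css (by omega) (by omega)
      have hlexb := hball' (pvCand css mN p) (List.mem_map_of_mem (hocc_mem p hoccp))
      rw [hb12] at hlexb
      have hlexb2 : ((bN : Int) - (aN : Int) + 1 < (pvOwnerNat css (p + mN - 1) : Int) - (pvOwnerNat css p : Int) + 1)
          ∨ (((bN : Int) - (aN : Int) + 1 = (pvOwnerNat css (p + mN - 1) : Int) - (pvOwnerNat css p : Int) + 1)
            ∧ ((aN : Int) ≤ (pvOwnerNat css p : Int))) := hlexb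
      omega
    have hA : find_context segment sentences
        = some (PySem.Str.join "" (PySem.List.slice sentences (some ((aN : Nat) : Int)) (some (((wN : Nat) : Int) + ((aN : Nat) : Int))))) := by
      by_cases hw1 : wN = 1
      · have hfirst := pv_first_found segment sentences aN (by omega)
          (fun j' _hj' hlt => hminP 1 j' le_rfl (by omega) (Or.inr ⟨hw1.symm, hlt⟩))
          (by rw [hw1] at hPwa; exact hPwa)
        have hval : (sentences[aN]'(by omega)) = PySem.Str.join ""
            (PySem.List.slice sentences (some ((aN : Nat) : Int)) (some (((wN : Nat) : Int) + ((aN : Nat) : Int)))) := by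
          apply String.toList_inj.mp
          rw [show ((wN : Nat) : Int) + ((aN : Nat) : Int) = ((aN : Nat) : Int) + ((wN : Nat) : Int) from by ring]
          rw [hw1, pv_joinSlice_toList sentences aN 1, pv_take1_flatten sentences aN (by omega)]
        unfold find_context
        rw [hfirst]
        show some (sentences[aN]'(by omega)) = _
        rw [hval]
      · have hfirst : pvFindFirst segment sentences = none :=
          pv_first_fail segment sentences
            (fun j _hj => hminP 1 j le_rfl (by omega) (Or.inl (by omega)))
        unfold find_context
        rw [hfirst]
        have hsplit : PySem.List.pyRange 1 ((sentences.length : Int) + 1) 1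
            = PySem.List.pyRange 1 ((wN : Nat) : Int) 1
              ++ PySem.List.pyRange ((wN : Nat) : Int) ((sentences.length : Int) + 1) 1 :=
          PySem.List.pyRange_one_append 1 ((wN : Nat) : Int) ((sentences.length : Int) + 1)
            (by omega) (by omega)
        rw [hsplit, pvOuterA_append segment sentences _ _ ?hsmall]
        case hsmall =>
          intro i hi
          have hi' := (PySem.List.mem_pyRange_one).mp hi
          apply pvWhileA_none
          intro j' _ hguard hQ
          have hiN : i = ((i.toNat : Nat) : Int) := by omega
          rw [hiN] at hQ
          exact hminP i.toNat j' (by omega) (by omega) (Or.inl (by omega))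
            ((pvQ_iff segment sentences i.toNat j').mp hQ)
        rw [PySem.List.pyRange_one_cons (by omega)]
        have hred : pvOuterA segment sentences
            (((wN : Nat) : Int) :: PySem.List.pyRange (((wN : Nat) : Int) + 1) ((sentences.length : Int) + 1) 1)
            = match pvWhileA segment sentences ((wN : Nat) : Int) 0 with
              | some s => some s
              | none => pvOuterA segment sentences (PySem.List.pyRange (((wN : Nat) : Int) + 1) ((sentences.length : Int) + 1) 1) := rfl
        rw [hred]
        rw [pvWhileA_found segment sentences ((wN : Nat) : Int) 0 aN (by omega) (by omega)
          (fun j' _ hlt hQ => hminP wN j' (by omega) (by omega) (Or.inr ⟨rfl, hlt⟩)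
            ((pvQ_iff segment sentences wN j').mp hQ))
          ((pvQ_iff segment sentences wN aN).mpr hPwa)]
    rw [hA, halt, hfold, hfoldb']
    show _ = some (PySem.Str.join "" (PySem.List.slice sentences (some b.2) (some (b.2 + b.1))))
    rw [hb1, hb2]
    rw [show ((aN : Nat) : Int) + ((wN : Nat) : Int) = ((wN : Nat) : Int) + ((aN : Nat) : Int) from by ring]

-- ===== VERDICT (by name: the statement is the Claim_ definition above) =====
theorem find_context_spec : Claim_equal_find_context := by
  unfold Claim_equal_find_context
  intro segment sentences _dom
  unfold Spec_find_context
  by_cases hne : sentences = []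
  · subst hne
    simp [find_context, find_context_alt, pvFindFirst, pvOuterA,
      PySem.List.pyRange_one_eq_nil]
    
  · by_cases hseg : segment = ""
    · subst hseg
      cases sentences with
      | nil => exact absurd rfl hne
      | cons s0 rest =>
        simp [find_context, find_context_alt, pvFindFirst]
    · exact pv_main segment sentences hne hseg
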